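-- pv_equiv track=rewrite | github.com/hrshl197/RBC-24-ML | Def_Off_2.py | check_1_x_winning_condition
-- ===== SOURCE A (Python) =====
-- def check_1_x_winning_condition(basket_stacks):
--     x_count = 0
--     o_count = 0
--     x_x_empty_count = 0
--     xo_count = 0
--
--     for basket in basket_stacks:
--         if basket == ['x', 'x', 'x'] or basket == ['x', 'o', 'x'] or basket == ['o', 'x', 'x']:
--             x_count += 1
--         elif basket == ['x', 'x', '']:
--             x_x_empty_count += 1
--         elif basket == ['o', 'o', 'o'] or basket == ['o', 'x', 'o'] or basket == ['x', 'o', 'o']: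
--             o_count += 1
--         elif basket == ['x', 'o', ''] or basket == ['o', 'x', '']:
--             xo_count += 1
--
--     if x_count == 1 and o_count <= 2 and x_x_empty_count <= 2 and xo_count == 0:
--         return True
--     else:
--         return False
-- ===== SOURCE B (Python) =====
-- def check_1_x_winning_condition(basket_stacks):
--     c = basket_stacks.count
--     x_count = c(['x', 'x', 'x']) + c(['x', 'o', 'x']) + c(['o', 'x', 'x'])
--     o_count = c(['o', 'o', 'o']) + c(['o', 'x', 'o']) + c(['x', 'o', 'o'])
--     x_x_empty_count = c(['x', 'x', ''])
--     xo_count = c(['x', 'o', '']) + c(['o', 'x', ''])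
--     return x_count == 1 and o_count <= 2 and x_x_empty_count <= 2 and xo_count == 0
-- ===== Notes on version B (the rewrite author's own statement) =====
-- stated objective: idiomatic
-- what changed: Replaces the per-basket branch cascade maintaining four counters with per-pattern list.count queries (tabulate-by-pattern instead of classify-by-basket); all nine patterns are distinct so the counts coincide.
import Mathlib
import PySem

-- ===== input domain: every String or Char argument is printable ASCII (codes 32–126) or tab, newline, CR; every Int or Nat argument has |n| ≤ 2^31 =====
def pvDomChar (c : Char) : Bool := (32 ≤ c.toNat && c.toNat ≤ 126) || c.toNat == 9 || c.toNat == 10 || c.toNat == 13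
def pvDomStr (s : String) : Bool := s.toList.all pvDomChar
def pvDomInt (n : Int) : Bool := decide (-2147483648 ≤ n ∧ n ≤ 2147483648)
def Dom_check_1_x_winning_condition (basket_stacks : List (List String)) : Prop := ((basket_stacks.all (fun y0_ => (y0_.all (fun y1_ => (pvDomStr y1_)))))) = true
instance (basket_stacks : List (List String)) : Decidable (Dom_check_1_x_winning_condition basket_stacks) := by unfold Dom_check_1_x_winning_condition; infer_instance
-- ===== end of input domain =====

-- B replaces A's per-basket branch cascade over four counters with per-pattern list.count queries (idiomatic; same cost).


-- ===== PORT A =====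
def pvLoopA (st : Int × Int × Int × Int) (basket : List String) : Int × Int × Int × Int :=
  if basket = ["x", "x", "x"] ∨ basket = ["x", "o", "x"] ∨ basket = ["o", "x", "x"] then
    (st.1 + 1, st.2.1, st.2.2.1, st.2.2.2)
  else if basket = ["x", "x", ""] then
    (st.1, st.2.1, st.2.2.1 + 1, st.2.2.2)
  else if basket = ["o", "o", "o"] ∨ basket = ["o", "x", "o"] ∨ basket = ["x", "o", "o"] then
    (st.1, st.2.1 + 1, st.2.2.1, st.2.2.2)
  else if basket = ["x", "o", ""] ∨ basket = ["o", "x", ""] then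
    (st.1, st.2.1, st.2.2.1, st.2.2.2 + 1)
  else st

def check_1_x_winning_condition (basket_stacks : List (List String)) : Bool :=
  let s := basket_stacks.foldl pvLoopA (0, 0, 0, 0)
  if s.1 = 1 ∧ s.2.1 ≤ 2 ∧ s.2.2.1 ≤ 2 ∧ s.2.2.2 = 0 then true else false

-- ===== PORT B =====
def check_1_x_winning_condition_alt (basket_stacks : List (List String)) : Bool :=
  let c := fun p => PySem.List.count basket_stacks p
  let x_count := c ["x", "x", "x"] + c ["x", "o", "x"] + c ["o", "x", "x"]
  let o_count := c ["o", "o", "o"] + c ["o", "x", "o"] + c ["x", "o", "o"]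
  let x_x_empty_count := c ["x", "x", ""]
  let xo_count := c ["x", "o", ""] + c ["o", "x", ""]
  decide (x_count = 1 ∧ o_count ≤ 2 ∧ x_x_empty_count ≤ 2 ∧ xo_count = 0)

-- ===== PRECONDITION & SPEC =====
def Spec_check_1_x_winning_condition (basket_stacks : List (List String)) (out : Bool) : Prop := out = check_1_x_winning_condition_alt basket_stacks
instance (basket_stacks : List (List String)) (out : Bool) : Decidable (Spec_check_1_x_winning_condition basket_stacks out) := by unfold Spec_check_1_x_winning_condition; infer_instance

-- ===== CLAIM (what is proved, stated in full; the proofs are below) =====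
def Claim_equal_check_1_x_winning_condition : Prop := ∀ (basket_stacks : List (List String)), Dom_check_1_x_winning_condition basket_stacks → Spec_check_1_x_winning_condition basket_stacks (check_1_x_winning_condition basket_stacks)

-- ===== LEMMAS AND PROOFS =====

-- the foldl state after processing l, started from st, is st plus the per-pattern counts of l
set_option maxHeartbeats 1000000 in
theorem pvLoopA_foldl (l : List (List String)) (st : Int × Int × Int × Int) :
    l.foldl pvLoopA st =
      (st.1 + (PySem.List.count l ["x", "x", "x"] + PySem.List.count l ["x", "o", "x"] + PySem.List.count l ["o", "x", "x"] : Nat),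
       st.2.1 + (PySem.List.count l ["o", "o", "o"] + PySem.List.count l ["o", "x", "o"] + PySem.List.count l ["x", "o", "o"] : Nat),
       st.2.2.1 + (PySem.List.count l ["x", "x", ""] : Nat),
       st.2.2.2 + (PySem.List.count l ["x", "o", ""] + PySem.List.count l ["o", "x", ""] : Nat)) := by
  induction l generalizing st with
  | nil => simp [PySem.List.count_eq]
  | cons hd t ih =>
    rw [List.foldl_cons, ih]
    unfold pvLoopA
    split_ifs with h1 h2 h3 h4
    · rcases h1 with rfl | rfl | rfl <;> · simp [PySem.List.count_eq, Prod.ext_iff]; omega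
    · subst h2; simp [PySem.List.count_eq, Prod.ext_iff]; omega
    · rcases h3 with rfl | rfl | rfl <;> · simp [PySem.List.count_eq, Prod.ext_iff]; omega
    · rcases h4 with rfl | rfl <;> · simp [PySem.List.count_eq, Prod.ext_iff]; omega
    · push Not at h1 h3 h4
      simp [PySem.List.count_eq, h1.1, h1.2.1, h1.2.2, h2, h3.1, h3.2.1, h3.2.2, h4.1, h4.2]

-- ===== VERDICT (by name: the statement is the Claim_ definition above) =====
theorem check_1_x_winning_condition_spec : Claim_equal_check_1_x_winning_condition := by
  intro basket_stacks _
  unfold Spec_check_1_x_winning_condition check_1_x_winning_condition check_1_x_winning_condition_alt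
  simp only [pvLoopA_foldl]
  simp only [Int.zero_add]
  split_ifs with h
  · obtain ⟨h1, h2, h3, h4⟩ := h
    symm; rw [decide_eq_true_iff]
    refine ⟨by exact_mod_cast h1, by exact_mod_cast h2, by exact_mod_cast h3, by exact_mod_cast h4⟩
  · symm; rw [decide_eq_false_iff_not]
    intro ⟨h1, h2, h3, h4⟩
    exact h ⟨by exact_mod_cast h1, by exact_mod_cast h2, by exact_mod_cast h3, by exact_mod_cast h4⟩
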